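-- pv_equiv track=rewrite | github.com/nsza521/Data-Struct-KMITL | Recursiom/lab6-4.py | perket
-- ===== SOURCE A (Python) =====
-- def perket(nums, s=1, b=0, index=0,flag = True):
--     if index == len(nums):
--         if flag:
--             return 1000000001
--         return abs(s - b)
--     num = nums[index].split(" ")
--     include_current = perket(nums, s * int(num[0]), b + int(num[1]), index + 1,False)
--     exclude_current = perket(nums, s, b, index + 1,flag)
--
--     return min(include_current, exclude_current)
-- ===== SOURCE B (Python) =====
-- def perket(nums, s=1, b=0, index=0, flag=True):
--     # Iterative subset enumeration: build all reachable (product, sum) pairs by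
--     # doubling, then take the min of |p - q| over the non-empty selections.
--     pairs = [(s, b)]
--     j = index
--     while j < len(nums):
--         parts = nums[j].split(" ")
--         so, bi = int(parts[0]), int(parts[1])
--         pairs += [(p * so, q + bi) for (p, q) in pairs]
--         j += 1
--     best = 1000000001 if flag else abs(s - b)
--     for (p, q) in pairs[1:]:
--         best = min(best, abs(p - q))
--     return best
-- ===== Notes on version B (the rewrite author's own statement) =====
-- stated objective: alternative
-- what changed: A's include/exclude recursion (which re-parses element i at each of its 2^i recursion nodes) is replaced by an iterative loop that parses each element once and doubles a list of reachable (product, sum) pairs, followed by a single min-scan over the non-empty selections.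
-- crash fix: When index > len(nums), A raises IndexError (the index == len(nums) stop is never reached) while B's while loop does not run and B returns the empty-selection value (1000000001 if flag else abs(s-b)). — e.g. on perket([], 1, 0, 1, true): A raises IndexError, B returns 1000000001
import Mathlib
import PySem

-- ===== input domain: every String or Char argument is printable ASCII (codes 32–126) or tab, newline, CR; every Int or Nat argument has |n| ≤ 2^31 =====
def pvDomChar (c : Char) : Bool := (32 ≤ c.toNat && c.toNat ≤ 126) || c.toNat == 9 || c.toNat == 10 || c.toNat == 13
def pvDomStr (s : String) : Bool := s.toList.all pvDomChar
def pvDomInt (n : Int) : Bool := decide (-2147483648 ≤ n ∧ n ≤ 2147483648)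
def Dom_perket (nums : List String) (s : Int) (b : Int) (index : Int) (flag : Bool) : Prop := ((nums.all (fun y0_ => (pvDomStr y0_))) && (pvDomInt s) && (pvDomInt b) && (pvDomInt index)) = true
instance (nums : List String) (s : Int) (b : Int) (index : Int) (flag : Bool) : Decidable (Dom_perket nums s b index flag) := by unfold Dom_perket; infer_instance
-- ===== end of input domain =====

-- B replaces A's include/exclude recursion by an iterative doubling of the list of
-- reachable (product, sum) pairs followed by one min-scan (objective: alternative;
-- each element is parsed once instead of at every recursion node).

-- ===== PORT A =====
-- shared faithful port of `num = x.split(" "); int(num[0]); int(num[1])`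
-- (none = IndexError on num[1] or ValueError on int(...))
def pvParse? (x : String) : Option (Int × Int) :=
  match PySem.Str.split? x " " with
  | none => none   -- unreachable: the separator " " is nonempty
  | some parts =>
  match PySem.List.pyGet? parts 0 with
  | none => none
  | some a =>
    match PySem.Int.ofStr? a with
    | none => none
    | some i =>
      match PySem.List.pyGet? parts 1 with
      | none => none
      | some c =>
        match PySem.Int.ofStr? c with
        | none => none
        | some j => some (i, j)

-- A's recursion, fuel = len(nums) - index (exact on Pre_, where index ≤ len);
-- the `none`/fuel-exhausted 0 is the raising path, excluded by Pre_.
def perketGo (fuel : Nat) (nums : List String) (s b index : Int) (flag : Bool) : Int :=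
  if index = (nums.length : Int) then (if flag then 1000000001 else |s - b|)
  else
    match fuel with
    | 0 => 0
    | n+1 =>
      match (PySem.List.pyGet? nums index).bind pvParse? with
      | some (x, y) =>
          min (perketGo n nums (s * x) (b + y) (index + 1) false)
              (perketGo n nums s b (index + 1) flag)
      | none => 0

def perket (nums : List String) (s : Int) (b : Int) (index : Int) (flag : Bool) : Int :=
  perketGo (((nums.length : Int) - index).toNat) nums s b index flag

-- ===== PORT B =====
def pvStep (pairs : List (Int × Int)) (x y : Int) : List (Int × Int) :=
  pairs ++ pairs.map (fun pq => (pq.1 * x, pq.2 + y))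

-- B's while loop: j from index while j < len, doubling `pairs`
def perketAltPairs (fuel : Nat) (nums : List String) (j : Int)
    (pairs : List (Int × Int)) : List (Int × Int) :=
  match fuel with
  | 0 => pairs
  | n+1 =>
    if j < (nums.length : Int) then
      match (PySem.List.pyGet? nums j).bind pvParse? with
      | some (x, y) => perketAltPairs n nums (j + 1) (pvStep pairs x y)
      | none => pairs   -- raising path, excluded by Pre_
    else pairs

def perket_alt (nums : List String) (s : Int) (b : Int) (index : Int) (flag : Bool) : Int :=
  let pairs := perketAltPairs (((nums.length : Int) - index).toNat) nums index [(s, b)]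
  let init : Int := if flag then 1000000001 else |s - b|
  (pairs.drop 1).foldl (fun acc pq => min acc |pq.1 - pq.2|) init

-- ===== PRECONDITION & SPEC =====
-- Pre_ excludes exactly the raising inputs: index beyond len(nums) (IndexError) and
-- any visited element (positions index..len-1, Python's negative wraparound included
-- via pyGet?) that does not split into two int-parseable fields (IndexError/ValueError).
def Pre_perket (nums : List String) (s : Int) (b : Int) (index : Int) (flag : Bool) : Prop :=
  (-(nums.length : Int) ≤ index ∧ index ≤ (nums.length : Int)) ∧
  ∀ j ∈ PySem.List.pyRange index (nums.length : Int) 1,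
    ((PySem.List.pyGet? nums j).bind pvParse?).isSome = true
instance (nums : List String) (s : Int) (b : Int) (index : Int) (flag : Bool) : Decidable (Pre_perket nums s b index flag) := by unfold Pre_perket; infer_instance

def pvWitness_perket : List String × Int × Int × Int × Bool := (["2 3", "1 4"], 1, 0, 0, true)

-- On inputs with index > len(nums), A raises IndexError (the index == len(nums) stop is never reached) while B's while loop simply does not run and B returns the empty-selection value.
def Raises_perket (nums : List String) (s : Int) (b : Int) (index : Int) (flag : Bool) : Prop :=
  (nums.length : Int) < index
instance (nums : List String) (s : Int) (b : Int) (index : Int) (flag : Bool) : Decidable (Raises_perket nums s b index flag) := by unfold Raises_perket; infer_instance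
def pvRaiseWitness_perket : List String × Int × Int × Int × Bool := ([], 1, 0, 1, true)
def pvRaiseWitnessOut_perket : Int := 1000000001

def Spec_perket (nums : List String) (s : Int) (b : Int) (index : Int) (flag : Bool) (out : Int) : Prop := out = perket_alt nums s b index flag
instance (nums : List String) (s : Int) (b : Int) (index : Int) (flag : Bool) (out : Int) : Decidable (Spec_perket nums s b index flag out) := by unfold Spec_perket; infer_instance

-- ===== CLAIM (what is proved, stated in full; the proofs are below) =====
def Claim_equal_perket : Prop := ∀ (nums : List String) (s : Int) (b : Int) (index : Int) (flag : Bool), Dom_perket nums s b index flag → Pre_perket nums s b index flag → Spec_perket nums s b index flag (perket nums s b index flag)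

def Claim_raises_perket : Prop := (∀ (nums : List String) (s : Int) (b : Int) (index : Int) (flag : Bool), Dom_perket nums s b index flag → Raises_perket nums s b index flag → ¬ Pre_perket nums s b index flag) ∧ (Dom_perket (pvRaiseWitness_perket.1) (pvRaiseWitness_perket.2.1) (pvRaiseWitness_perket.2.2.1) (pvRaiseWitness_perket.2.2.2.1) (pvRaiseWitness_perket.2.2.2.2) ∧ Raises_perket (pvRaiseWitness_perket.1) (pvRaiseWitness_perket.2.1) (pvRaiseWitness_perket.2.2.1) (pvRaiseWitness_perket.2.2.2.1) (pvRaiseWitness_perket.2.2.2.2) ∧ perket_alt (pvRaiseWitness_perket.1) (pvRaiseWitness_perket.2.1) (pvRaiseWitness_perket.2.2.1) (pvRaiseWitness_perket.2.2.2.1) (pvRaiseWitness_perket.2.2.2.2) = pvRaiseWitnessOut_perket)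

-- ===== LEMMAS AND PROOFS =====

-- The list of parsed (sourness, bitterness) items at positions j, j+1, … (fuel many)
def itemsF : Nat → List String → Int → List (Int × Int)
  | 0, _, _ => []
  | n+1, nums, j =>
    match (PySem.List.pyGet? nums j).bind pvParse? with
    | some p => p :: itemsF n nums (j + 1)
    | none => []

-- A's recursion, abstracted over the parsed item list
def recA : List (Int × Int) → Int → Int → Bool → Int
  | [], s, b, flag => if flag then 1000000001 else |s - b|
  | (x, y) :: t, s, b, flag =>
      min (recA t (s * x) (b + y) false) (recA t s b flag)

-- B's doubling loop, abstracted over the parsed item list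
def PP (acc : List (Int × Int)) (L : List (Int × Int)) : List (Int × Int) :=
  L.foldl (fun acc xy => pvStep acc xy.1 xy.2) acc

def vAbs (pq : Int × Int) : Int := |pq.1 - pq.2|

def mfold (a : Int) (l : List Int) : Int := l.foldl min a

theorem mfold_append (a : Int) (l1 l2 : List Int) :
    mfold a (l1 ++ l2) = mfold (mfold a l1) l2 := by
  simp [mfold, List.foldl_append]

theorem mfold_pull (x : Int) (l2 : List Int) : ∀ (l1 : List Int) (a : Int),
    mfold a (l1 ++ x :: l2) = mfold (min a x) (l1 ++ l2) := by
  intro l1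
  induction l1 with
  | nil => intro a; rfl
  | cons y t ih =>
      intro a
      show mfold (min a y) (t ++ x :: l2) = mfold (min (min a x) y) (t ++ l2)
      rw [ih, min_right_comm]

theorem mfold_two_maps (g h : Int × Int → Int) :
    ∀ (l : List (Int × Int)) (a : Int),
    mfold a (l.map g ++ l.map h) = mfold a (l.map (fun z => min (h z) (g z))) := by
  intro l
  induction l with
  | nil => intro a; rfl
  | cons z t ih =>
      intro a
      show mfold (min a (g z)) (t.map g ++ h z :: t.map h)
          = mfold (min a (min (h z) (g z))) (t.map (fun z => min (h z) (g z)))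
      rw [mfold_pull, ih, min_assoc, min_comm (g z) (h z)]

-- the head element of the pair list (the empty selection) is preserved by the loop
theorem PP_head : ∀ (L : List (Int × Int)) (c : Int × Int) (acc : List (Int × Int)),
    ∃ r, PP (c :: acc) L = c :: r := by
  intro L
  induction L with
  | nil => intro c acc; exact ⟨acc, rfl⟩
  | cons xy t ih =>
      intro c acc
      have : PP (c :: acc) (xy :: t)
          = PP (c :: (acc ++ (c :: acc).map (fun pq => (pq.1 * xy.1, pq.2 + xy.2)))) t := by
        simp [PP, pvStep]
      rw [this]
      exact ih c _

theorem PP_perm : ∀ (L : List (Int × Int)) {a1 a2 : List (Int × Int)},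
    a1.Perm a2 → (PP a1 L).Perm (PP a2 L) := by
  intro L
  induction L with
  | nil => intro a1 a2 h; exact h
  | cons xy t ih =>
      intro a1 a2 h
      exact ih (h.append (h.map _))

theorem pvStep_append (a1 a2 : List (Int × Int)) (x y : Int) :
    (pvStep (a1 ++ a2) x y).Perm (pvStep a1 x y ++ pvStep a2 x y) := by
  simp only [pvStep, List.map_append, List.append_assoc]
  refine (List.Perm.append_left a1 ?_)
  rw [← List.append_assoc]
  have h := (List.perm_append_comm (l₁ := a2) (l₂ := a1.map (fun pq => (pq.1 * x, pq.2 + y)))).append_right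
      (a2.map (fun pq => (pq.1 * x, pq.2 + y)))
  simpa [List.append_assoc] using h

theorem PP_append : ∀ (L : List (Int × Int)) (a1 a2 : List (Int × Int)),
    (PP (a1 ++ a2) L).Perm (PP a1 L ++ PP a2 L) := by
  intro L
  induction L with
  | nil => intro a1 a2; exact List.Perm.refl _
  | cons xy t ih =>
      intro a1 a2
      have h1 : (PP (a1 ++ a2) (xy :: t)).Perm (PP (pvStep a1 xy.1 xy.2 ++ pvStep a2 xy.1 xy.2) t) :=
        PP_perm t (pvStep_append a1 a2 xy.1 xy.2)
      exact h1.trans (ih _ _)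

theorem mfold_perm {l1 l2 : List Int} (h : l1.Perm l2) (a : Int) :
    mfold a l1 = mfold a l2 := by
  unfold mfold
  exact h.foldl_eq a

-- the min over ALL pair values produced from a start set equals the min over the
-- per-start full-subset recursions (flag = False)
theorem mfold_PP : ∀ (L : List (Int × Int)) (acc : List (Int × Int)) (a : Int),
    mfold a ((PP acc L).map vAbs)
      = mfold a (acc.map (fun pq => recA L pq.1 pq.2 false)) := by
  intro L
  induction L with
  | nil =>
      intro acc a
      rfl
  | cons xy t ih =>
      intro acc a
      have h1 : PP acc (xy :: t) = PP (pvStep acc xy.1 xy.2) t := rfl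
      rw [h1, ih]
      have h2 : (pvStep acc xy.1 xy.2).map (fun pq => recA t pq.1 pq.2 false)
          = acc.map (fun pq => recA t pq.1 pq.2 false)
            ++ acc.map (fun pq => recA t (pq.1 * xy.1) (pq.2 + xy.2) false) := by
        simp [pvStep, List.map_map, Function.comp]
      rw [h2, mfold_two_maps]
      have h3 : (fun z : Int × Int => min (recA t (z.1 * xy.1) (z.2 + xy.2) false) (recA t z.1 z.2 false))
          = fun pq : Int × Int => recA (xy :: t) pq.1 pq.2 false := by
        funext pq
        obtain ⟨x, y⟩ := xy
        rfl
      rw [h3]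

-- the core combinatorial fact: B's "doubled pairs, then min over the tail" equals
-- A's include/exclude recursion, for either flag
theorem recA_eq_mfold : ∀ (L : List (Int × Int)) (s b : Int) (flag : Bool),
    mfold (if flag then 1000000001 else |s - b|) (((PP [(s, b)] L).drop 1).map vAbs)
      = recA L s b flag := by
  intro L
  induction L with
  | nil => intro s b flag; rfl
  | cons xy t ih =>
      intro s b flag
      obtain ⟨x, y⟩ := xy
      have hstep : PP [(s, b)] ((x, y) :: t) = PP [(s, b), (s * x, b + y)] t := by
        simp [PP, pvStep]
      obtain ⟨r1, hr1⟩ := PP_head t (s, b) []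
      obtain ⟨r2, hr2⟩ := PP_head t (s, b) [(s * x, b + y)]
      have hsplit : (PP [(s, b), (s * x, b + y)] t).Perm (PP [(s, b)] t ++ PP [(s * x, b + y)] t) := by
        have := PP_append t [(s, b)] [(s * x, b + y)]
        simpa using this
      have hperm : r2.Perm (r1 ++ PP [(s * x, b + y)] t) := by
        have h := hsplit
        rw [hr2, hr1] at h
        have h' : ((s, b) :: r2).Perm ((s, b) :: (r1 ++ PP [(s * x, b + y)] t)) := by
          simpa using h
        exact h'.cons_inv
      have hdrop : (PP [(s, b)] ((x, y) :: t)).drop 1 = r2 := by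
        rw [hstep, hr2]; rfl
      rw [hdrop]
      have := mfold_perm (hperm.map vAbs) (if flag then 1000000001 else |s - b|)
      rw [this, List.map_append, mfold_append]
      rw [mfold_PP t [(s * x, b + y)]]
      have htail : ((PP [(s, b)] t).drop 1) = r1 := by rw [hr1]; rfl
      have hih : mfold (if flag then 1000000001 else |s - b|) (r1.map vAbs) = recA t s b flag := by
        rw [← htail]; exact ih s b flag
      show min (mfold (if flag then 1000000001 else |s - b|) (r1.map vAbs)) (recA t (s * x) (b + y) false)
          = recA ((x, y) :: t) s b flag
      rw [hih]
      show min (recA t s b flag) (recA t (s * x) (b + y) false)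
          = min (recA t (s * x) (b + y) false) (recA t s b flag)
      exact min_comm _ _

-- A's port computes recA over the parsed items (fuel exact, all positions parse)
theorem perketGo_eq_recA : ∀ (fuel : Nat) (nums : List String) (index s b : Int) (flag : Bool),
    (((nums.length : Int) - index).toNat = fuel) → index ≤ (nums.length : Int) →
    (∀ j ∈ PySem.List.pyRange index (nums.length : Int) 1,
        ((PySem.List.pyGet? nums j).bind pvParse?).isSome = true) →
    perketGo fuel nums s b index flag = recA (itemsF fuel nums index) s b flag := by
  intro fuel
  induction fuel with
  | zero =>
      intro nums index s b flag hf hle _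
      have : index = (nums.length : Int) := by omega
      simp [perketGo, itemsF, recA, this]
  | succ n ih =>
      intro nums index s b flag hf hle hp
      have hlt : index < (nums.length : Int) := by omega
      have hne : ¬ index = (nums.length : Int) := by omega
      have hmem : index ∈ PySem.List.pyRange index (nums.length : Int) 1 := by
        rw [PySem.List.mem_pyRange_one]; omega
      have hs := hp index hmem
      obtain ⟨⟨x, y⟩, hxy⟩ := Option.isSome_iff_exists.mp hs
      have hp' : ∀ j ∈ PySem.List.pyRange (index + 1) (nums.length : Int) 1,
          ((PySem.List.pyGet? nums j).bind pvParse?).isSome = true := by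
        intro j hj
        rw [PySem.List.mem_pyRange_one] at hj
        exact hp j (by rw [PySem.List.mem_pyRange_one]; omega)
      rw [perketGo, if_neg hne]
      simp only [hxy]
      rw [itemsF, hxy]
      rw [ih nums (index + 1) (s * x) (b + y) false (by omega) (by omega) hp',
          ih nums (index + 1) s b flag (by omega) (by omega) hp']
      rfl

-- B's port builds PP over the same parsed items
theorem perketAltPairs_eq_PP : ∀ (fuel : Nat) (nums : List String) (j : Int)
    (pairs : List (Int × Int)),
    (((nums.length : Int) - j).toNat = fuel) → j ≤ (nums.length : Int) →
    (∀ k ∈ PySem.List.pyRange j (nums.length : Int) 1,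
        ((PySem.List.pyGet? nums k).bind pvParse?).isSome = true) →
    perketAltPairs fuel nums j pairs = PP pairs (itemsF fuel nums j) := by
  intro fuel
  induction fuel with
  | zero => intro nums j pairs _ _ _; rfl
  | succ n ih =>
      intro nums j pairs hf hle hp
      have hlt : j < (nums.length : Int) := by omega
      have hmem : j ∈ PySem.List.pyRange j (nums.length : Int) 1 := by
        rw [PySem.List.mem_pyRange_one]; omega
      obtain ⟨⟨x, y⟩, hxy⟩ := Option.isSome_iff_exists.mp (hp j hmem)
      have hp' : ∀ k ∈ PySem.List.pyRange (j + 1) (nums.length : Int) 1,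
          ((PySem.List.pyGet? nums k).bind pvParse?).isSome = true := by
        intro k hk
        rw [PySem.List.mem_pyRange_one] at hk
        exact hp k (by rw [PySem.List.mem_pyRange_one]; omega)
      rw [perketAltPairs, if_pos hlt]
      simp only [hxy]
      rw [itemsF, hxy]
      exact ih nums (j + 1) (pvStep pairs x y) (by omega) (by omega) hp'

-- ===== VERDICT (by name: the statement is the Claim_ definition above) =====
theorem perket_spec : Claim_equal_perket := by
  intro nums s b index flag _ hpre
  obtain ⟨⟨_, hle⟩, hp⟩ := hpre
  unfold Spec_perket perket perket_alt
  simp only []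
  rw [perketGo_eq_recA (((nums.length : Int) - index).toNat) nums index s b flag rfl hle hp,
      perketAltPairs_eq_PP (((nums.length : Int) - index).toNat) nums index [(s, b)] rfl hle hp]
  rw [← recA_eq_mfold (itemsF (((nums.length : Int) - index).toNat) nums index) s b flag]
  simp only [mfold, List.foldl_map]
  rfl

@[simp] theorem perket_raises : Claim_raises_perket := by
  unfold Claim_raises_perket
  constructor
  · intro nums s b index flag _ hr hpre
    exact absurd hpre.1.2 (by exact not_le.mpr hr)
  · exact ⟨by decide, by decide, by decide⟩
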